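-- pv_equiv track=rewrite | github.com/Fronza587-code/CISC-121-Final-Project---Duco-Tabor | app.py | build_dgts_indxs
-- ===== SOURCE A (Python) =====
-- def build_dgts_indxs (arr, jump_checked, linear_checked, found_index):
--     pairs = []
--     for idx, value in enumerate(arr):
--         label = None
--
--         if found_index is not None and idx == found_index:
--             label = "found"
--         elif idx in jump_checked and idx in linear_checked:
--             label = "jump + linear"
--         elif idx in jump_checked:
--             label = "jump"
--         elif idx in linear_checked:
--             label = "linear"
--
--         pairs.append ((str(value), label))
--     return pairs
-- ===== SOURCE B (Python) =====
-- def build_dgts_indxs(arr, jump_checked, linear_checked, found_index):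
--     n = len(arr)
--     labels = [None] * n
--     for idx in jump_checked:
--         if 0 <= idx < n:
--             labels[idx] = "jump"
--     for idx in linear_checked:
--         if 0 <= idx < n:
--             cur = labels[idx]
--             if cur == "jump":
--                 labels[idx] = "jump + linear"
--             elif cur is None:
--                 labels[idx] = "linear"
--     if found_index is not None and 0 <= found_index < n:
--         labels[found_index] = "found"
--     return [(str(v), labels[i]) for i, v in enumerate(arr)]
-- ===== Notes on version B (the rewrite author's own statement) =====
-- stated objective: faster
-- what changed: B scatters labels from the checked collections into a preallocated label array (jump writes, then linear upgrades, then the found override) and reads it back in one enumerate pass, instead of A's per-index membership scans of both lists.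
import Mathlib
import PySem

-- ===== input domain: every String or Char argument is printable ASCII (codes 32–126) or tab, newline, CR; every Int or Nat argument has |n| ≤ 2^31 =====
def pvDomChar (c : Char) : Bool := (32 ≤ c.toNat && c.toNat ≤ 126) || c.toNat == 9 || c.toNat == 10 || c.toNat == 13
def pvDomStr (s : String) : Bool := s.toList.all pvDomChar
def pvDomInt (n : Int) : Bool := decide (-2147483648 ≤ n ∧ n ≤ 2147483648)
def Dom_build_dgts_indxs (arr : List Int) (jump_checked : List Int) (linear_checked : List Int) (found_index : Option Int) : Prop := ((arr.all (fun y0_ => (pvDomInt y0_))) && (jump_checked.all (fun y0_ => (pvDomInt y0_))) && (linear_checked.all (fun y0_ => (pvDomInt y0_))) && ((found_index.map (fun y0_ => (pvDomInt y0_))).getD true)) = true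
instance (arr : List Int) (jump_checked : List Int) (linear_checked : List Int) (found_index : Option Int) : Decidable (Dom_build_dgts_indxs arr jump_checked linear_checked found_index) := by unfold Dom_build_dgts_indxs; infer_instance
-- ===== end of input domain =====

-- B replaces A's per-index membership scans by a scatter pass over the checked
-- collections into a label array (objective: faster — O(len(arr)+|jump|+|linear|)
-- instead of O(len(arr)·(|jump|+|linear|))).

-- ===== PORT A =====
def build_dgts_indxs (arr : List Int) (jump_checked : List Int) (linear_checked : List Int) (found_index : Option Int) : List (String × Option String) :=
  (PySem.List.enumerate arr).foldl
    (fun pairs p =>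
      let idx := p.1
      let value := p.2
      let label : Option String :=
        if found_index ≠ none ∧ found_index = some idx then some "found"
        else if idx ∈ jump_checked ∧ idx ∈ linear_checked then some "jump + linear"
        else if idx ∈ jump_checked then some "jump"
        else if idx ∈ linear_checked then some "linear"
        else none
      pairs ++ [(PySem.Int.toStr value, label)]) []

-- ===== PORT B =====
-- port of Source B: scatter 'jump' writes, then 'linear' upgrades, then the 'found'
-- override, finally read the label array back while enumerating arr.
-- labels[i] (always in range in Source B) is ported as .getD i none.
def build_dgts_indxs_alt (arr : List Int) (jump_checked : List Int) (linear_checked : List Int) (found_index : Option Int) : List (String × Option String) :=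
  let n : Int := arr.length
  let labels0 : List (Option String) := List.replicate arr.length none
  let labels1 := jump_checked.foldl (fun ls idx =>
      if 0 ≤ idx ∧ idx < n then ls.set idx.toNat (some "jump") else ls) labels0
  let labels2 := linear_checked.foldl (fun ls idx =>
      if 0 ≤ idx ∧ idx < n then
        if ls.getD idx.toNat none = some "jump" then ls.set idx.toNat (some "jump + linear")
        else if ls.getD idx.toNat none = none then ls.set idx.toNat (some "linear")
        else ls
      else ls) labels1
  let labels3 := found_index.elim labels2
    (fun f => if 0 ≤ f ∧ f < n then labels2.set f.toNat (some "found") else labels2)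
  (PySem.List.enumerate arr).map (fun p => (PySem.Int.toStr p.2, labels3.getD p.1.toNat none))

-- ===== PRECONDITION & SPEC =====
def Spec_build_dgts_indxs (arr : List Int) (jump_checked : List Int) (linear_checked : List Int) (found_index : Option Int) (out : List (String × Option String)) : Prop := out = build_dgts_indxs_alt arr jump_checked linear_checked found_index
instance (arr : List Int) (jump_checked : List Int) (linear_checked : List Int) (found_index : Option Int) (out : List (String × Option String)) : Decidable (Spec_build_dgts_indxs arr jump_checked linear_checked found_index out) := by unfold Spec_build_dgts_indxs; infer_instance

-- ===== CLAIM (what is proved, stated in full; the proofs are below) =====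
def Claim_equal_build_dgts_indxs : Prop := ∀ (arr : List Int) (jump_checked : List Int) (linear_checked : List Int) (found_index : Option Int), Dom_build_dgts_indxs arr jump_checked linear_checked found_index → Spec_build_dgts_indxs arr jump_checked linear_checked found_index (build_dgts_indxs arr jump_checked linear_checked found_index)

-- ===== LEMMAS AND PROOFS =====

-- 'append one element' fold = map
theorem pv_foldl_append_map {α β : Type} (f : α → β) :
    ∀ (l : List α) (acc : List β),
      l.foldl (fun acc x => acc ++ [f x]) acc = acc ++ l.map f := by
  intro l
  induction l with
  | nil => intro acc; simp
  | cons x xs ih => intro acc; simp [List.foldl, ih]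

-- the jump scatter pass: length preserved
theorem pv_jumpFold_length (n : Int) :
    ∀ (ks : List Int) (ls : List (Option String)),
      (ks.foldl (fun ls idx => if 0 ≤ idx ∧ idx < n then ls.set idx.toNat (some "jump") else ls) ls).length = ls.length := by
  intro ks
  induction ks with
  | nil => intro ls; rfl
  | cons k ks ih =>
      intro ls
      simp only [List.foldl]
      split <;> simp [ih]

-- the jump scatter pass: the slot of every in-range index
theorem pv_jumpFold_getD (n : Int) :
    ∀ (ks : List Int) (ls : List (Option String)), (ls.length : Int) = n →
      ∀ (i : Nat), i < ls.length →
      (ks.foldl (fun ls idx => if 0 ≤ idx ∧ idx < n then ls.set idx.toNat (some "jump") else ls) ls).getD i none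
        = if (i : Int) ∈ ks then some "jump" else ls.getD i none := by
  intro ks
  induction ks with
  | nil => intro ls _ i _; simp
  | cons k ks ih =>
      intro ls hlen i hi
      simp only [List.foldl]
      by_cases hk : 0 ≤ k ∧ k < n
      · rw [if_pos hk]
        rw [ih (ls.set k.toNat (some "jump")) (by simpa using hlen) i (by simpa using hi)]
        by_cases hik : (i : Int) = k
        · have : k.toNat = i := by omega
          simp [hik, this, List.getD, hi]
        · have hne : k.toNat ≠ i := by omega
          simp only [List.getD, List.getElem?_set_ne hne]
          simp [List.mem_cons, hik]
      · rw [if_neg hk]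
        rw [ih ls hlen i hi]
        have hik : (i : Int) ≠ k := by omega
        simp [List.mem_cons, hik]

-- the 'linear' upgrade applied to one slot
def pvLinStep (x : Option String) : Option String :=
  if x = some "jump" then some "jump + linear" else if x = none then some "linear" else x

-- the linear scatter pass: length preserved
theorem pv_linFold_length (n : Int) :
    ∀ (ks : List Int) (ls : List (Option String)),
      (ks.foldl (fun ls idx =>
        if 0 ≤ idx ∧ idx < n then
          if ls.getD idx.toNat none = some "jump" then ls.set idx.toNat (some "jump + linear")
          else if ls.getD idx.toNat none = none then ls.set idx.toNat (some "linear")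
          else ls
        else ls) ls).length = ls.length := by
  intro ks
  induction ks with
  | nil => intro ls; rfl
  | cons k ks ih =>
      intro ls
      simp only [List.foldl]
      split
      · split
        · rw [ih, List.length_set]
        · split
          · rw [ih, List.length_set]
          · exact ih ls
      · exact ih ls

-- one step of the linear pass is pvLinStep on the written slot
theorem pv_linFold_getD (n : Int) :
    ∀ (ks : List Int) (ls : List (Option String)), (ls.length : Int) = n →
      ∀ (i : Nat), i < ls.length →
      (ks.foldl (fun ls idx =>
        if 0 ≤ idx ∧ idx < n then
          if ls.getD idx.toNat none = some "jump" then ls.set idx.toNat (some "jump + linear")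
          else if ls.getD idx.toNat none = none then ls.set idx.toNat (some "linear")
          else ls
        else ls) ls).getD i none
        = if (i : Int) ∈ ks then pvLinStep (ls.getD i none) else ls.getD i none := by
  intro ks
  induction ks with
  | nil => intro ls _ i _; simp
  | cons k ks ih =>
      intro ls hlen i hi
      simp only [List.foldl]
      by_cases hk : 0 ≤ k ∧ k < n
      · rw [if_pos hk]
        have hkn : k.toNat < ls.length := by omega
        have hset : ∀ v : Option String,
            ((ls.set k.toNat v).getD i none) =
              if k.toNat = i then v else ls.getD i none := by
          intro v
          by_cases hik : k.toNat = i
          · subst hik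
            simp [List.getD, hkn]
          · simp [List.getD, List.getElem?_set_ne hik, hik]
        have hls' : ∀ v : Option String, ((ls.set k.toNat v).length : Int) = n := by
          intro v; simpa using hlen
        -- ls' = the list after processing k; in every branch ls'.getD i none =
        --   if k.toNat = i then pvLinStep (ls.getD i none) else ls.getD i none
        -- and ls'.length = ls.length
        by_cases hcur : ls.getD k.toNat none = some "jump"
        · rw [if_pos hcur]
          simp only [List.getD] at hcur
          rw [ih _ (hls' _) i (by simpa using hi), hset]
          by_cases hik : k.toNat = i
          · subst hik
            have hmem : (↑k.toNat : Int) ∈ k :: ks := by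
              have : (↑k.toNat : Int) = k := by omega
              simp [this]
            simp only [hmem, if_true]
            by_cases hmem2 : (↑k.toNat : Int) ∈ ks
            · simp [hcur, pvLinStep, List.getD]
            · simp [hcur, pvLinStep, List.getD]
          · have hik' : (i : Int) ≠ k := by omega
            simp [hik, List.mem_cons, hik']
        · rw [if_neg hcur]
          by_cases hcur2 : ls.getD k.toNat none = none
          · rw [if_pos hcur2]
            simp only [List.getD] at hcur2
            rw [ih _ (hls' _) i (by simpa using hi), hset]
            by_cases hik : k.toNat = i
            · subst hik
              have hmem : (↑k.toNat : Int) ∈ k :: ks := by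
                have : (↑k.toNat : Int) = k := by omega
                simp [this]
              simp only [hmem, if_true]
              by_cases hmem2 : (↑k.toNat : Int) ∈ ks
              · simp [hcur2, pvLinStep, List.getD]
              · simp [hcur2, pvLinStep, List.getD]
            · have hik' : (i : Int) ≠ k := by omega
              simp [hik, List.mem_cons, hik']
          · rw [if_neg hcur2]
            rw [ih ls hlen i hi]
            by_cases hik : (i : Int) = k
            · have hkn' : k.toNat = i := by omega
              have : pvLinStep (ls.getD i none) = ls.getD i none := by
                rw [← hkn'] at *
                simp only [List.getD] at hcur hcur2 ⊢
                simp [pvLinStep, hcur, hcur2]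
              simp only [List.getD] at this
              simp [List.mem_cons, hik, this]
            · simp [List.mem_cons, hik]
      · rw [if_neg hk]
        rw [ih ls hlen i hi]
        have hik : (i : Int) ≠ k := by omega
        simp [List.mem_cons, hik]

theorem build_dgts_indxs_spec : Claim_equal_build_dgts_indxs := by
  unfold Claim_equal_build_dgts_indxs
  intro arr jump_checked linear_checked found_index _
  unfold Spec_build_dgts_indxs build_dgts_indxs build_dgts_indxs_alt
  rw [pv_foldl_append_map]
  simp only [List.nil_append]
  apply List.map_congr_left
  intro p hp
  rcases (PySem.List.mem_enumerate_iff arr 0 p).1 hp with ⟨k, hk, rfl⟩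
  refine Prod.ext rfl ?_
  simp only [zero_add]
  have hlen0 : ((List.replicate arr.length (none : Option String)).length : Int) = (arr.length : Int) := by simp
  have hk0 : k < (List.replicate arr.length (none : Option String)).length := by simpa using hk
  have h1 := pv_jumpFold_getD (arr.length : Int) jump_checked _ hlen0 k hk0
  have hlen1 : (((jump_checked.foldl (fun ls idx => if 0 ≤ idx ∧ idx < (arr.length : Int) then ls.set idx.toNat (some "jump") else ls) (List.replicate arr.length none)).length : Int)) = (arr.length : Int) := by
    rw [pv_jumpFold_length]; simp
  have hk1 : k < (jump_checked.foldl (fun ls idx => if 0 ≤ idx ∧ idx < (arr.length : Int) then ls.set idx.toNat (some "jump") else ls) (List.replicate arr.length none)).length := by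
    rw [pv_jumpFold_length]; simpa using hk
  have h2 := pv_linFold_getD (arr.length : Int) linear_checked _ hlen1 k hk1
  have hrep : (List.replicate arr.length (none : Option String)).getD k none = none := by
    simp [List.getD]
  rw [h1, hrep] at h2
  have hk2 : k < (linear_checked.foldl (fun ls idx =>
        if 0 ≤ idx ∧ idx < (arr.length : Int) then
          if ls.getD idx.toNat none = some "jump" then ls.set idx.toNat (some "jump + linear")
          else if ls.getD idx.toNat none = none then ls.set idx.toNat (some "linear")
          else ls
        else ls) (jump_checked.foldl (fun ls idx => if 0 ≤ idx ∧ idx < (arr.length : Int) then ls.set idx.toNat (some "jump") else ls) (List.replicate arr.length none))).length := by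
    rw [pv_linFold_length]; exact hk1
  simp only [List.getD] at h2 hk2
  have hkt : ((k : Int)).toNat = k := by omega
  cases found_index with
  | none =>
      simp only [Option.elim, hkt, List.getD]
      rw [h2]
      by_cases hj : (k : Int) ∈ jump_checked <;> by_cases hl : (k : Int) ∈ linear_checked <;>
        simp [hj, hl, pvLinStep]
  | some f =>
      simp only [Option.elim, hkt, List.getD]
      by_cases hf : 0 ≤ f ∧ f < (arr.length : Int)
      · rw [if_pos hf]
        by_cases hfk : f = (k : Int)
        · have hfn : f.toNat = k := by omega
          rw [hfn, List.getElem?_set_self hk2]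
          simp [hfk]
        · have hne : f.toNat ≠ k := by omega
          rw [List.getElem?_set_ne hne, h2]
          have : ¬ (some f ≠ none ∧ some f = some (k : Int)) := by simp [hfk]
          rw [if_neg this]
          by_cases hj : (k : Int) ∈ jump_checked <;> by_cases hl : (k : Int) ∈ linear_checked <;>
            simp [hj, hl, pvLinStep]
      · rw [if_neg hf]
        have hfk : f ≠ (k : Int) := by omega
        rw [h2]
        have : ¬ (some f ≠ none ∧ some f = some (k : Int)) := by simp [hfk]
        rw [if_neg this]
        by_cases hj : (k : Int) ∈ jump_checked <;> by_cases hl : (k : Int) ∈ linear_checked <;>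
          simp [hj, hl, pvLinStep]
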